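-- pv_equiv track=rewrite | github.com/eren-stannard/ICT304-SOMS-Project | ODS/data_augmentation.py | create_uniform_distribution
-- ===== SOURCE A (Python) =====
-- def create_uniform_distribution(min_val: int = 0, max_val: int = 50, total_samples: int = 5000) -> dict[int, int]:
--     """
--     Create a uniformly distributed set of count values.
--
--     Parameters
--     ----------
--     min_val : int, optional, default=0
--         Minimum value.
--     max_val : int, optional, default=50
--         Maximum value.
--     total_samples : int, optional, default=5000
--         Total number of samples.
--
--     Returns
--     -------
--     target_distribution : dict[int, int]
--         Count values as keys, target frequencies as values.
--     """
--
--     # Calculate the number of unique values in the range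
--     num_values: int = max_val - min_val + 1
--
--     # Calculate the samples per value (floor to ensure we don't exceed total)
--     samples_per_value = total_samples // num_values
--
--     # Initialise distribution with equal counts
--     target_distribution = {val: samples_per_value for val in range(min_val, max_val + 1)}
--
--     # Distribute any remaining samples (due to integer division)
--     remaining = total_samples - (samples_per_value * num_values)
--     for val in range(min_val, min_val + remaining):
--         target_distribution[val] += 1
--
--     return target_distribution
-- ===== SOURCE B (Python) =====
-- def create_uniform_distribution(min_val: int = 0, max_val: int = 50, total_samples: int = 5000) -> dict[int, int]:
--     # Greedy sequential allocation: walk the values once, giving each the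
--     # ceiling of (samples still to place) / (values still to fill).
--     target_distribution: dict[int, int] = {}
--     remaining = total_samples
--     values_left = max_val - min_val + 1
--     val = min_val
--     while values_left > 0:
--         share = -(-remaining // values_left)  # ceiling division
--         target_distribution[val] = share
--         remaining -= share
--         val += 1
--         values_left -= 1
--     return target_distribution
-- ===== Notes on version B (the rewrite author's own statement) =====
-- stated objective: alternative
-- what changed: Replaces A's precomputed quotient-plus-remainder patch loop (build a dict of equal counts, then mutate the first `remaining` keys) by a single-pass greedy allocator that keeps a running remainder and gives each successive value the ceiling of remaining/values_left, with no precomputed remainder and no second pass.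
import Mathlib
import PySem

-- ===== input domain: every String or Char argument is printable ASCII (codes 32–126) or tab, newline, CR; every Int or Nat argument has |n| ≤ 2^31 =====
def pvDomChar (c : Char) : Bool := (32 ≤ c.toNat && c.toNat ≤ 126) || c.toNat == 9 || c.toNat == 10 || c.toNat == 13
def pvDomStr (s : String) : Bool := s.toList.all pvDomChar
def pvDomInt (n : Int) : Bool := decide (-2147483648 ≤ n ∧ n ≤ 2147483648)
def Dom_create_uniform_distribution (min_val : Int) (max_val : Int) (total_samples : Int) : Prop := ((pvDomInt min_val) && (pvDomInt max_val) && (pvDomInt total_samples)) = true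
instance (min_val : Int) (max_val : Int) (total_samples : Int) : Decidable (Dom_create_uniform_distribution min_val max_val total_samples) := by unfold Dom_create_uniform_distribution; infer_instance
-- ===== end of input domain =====

-- B replaces A's precomputed-quotient-then-patch two passes by a single-pass greedy
-- allocator with a running remainder (objective: alternative); same return value
-- everywhere A returns.

-- ===== PORT A =====
def create_uniform_distribution (min_val : Int) (max_val : Int) (total_samples : Int) : List (Int × Int) :=
  let num_values : Int := max_val - min_val + 1
  let samples_per_value : Int := PySem.Int.floordiv total_samples num_values
  -- dict comprehension {val: samples_per_value for val in range(min_val, max_val + 1)}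
  let target_distribution : PySem.Dict Int Int :=
    (PySem.List.pyRange min_val (max_val + 1) 1).foldl
      (fun d val => d.insert val samples_per_value) PySem.Dict.empty
  let remaining : Int := total_samples - samples_per_value * num_values
  -- 'target_distribution[val] += 1': exact here — every val in this loop is a key of the dict
  ((PySem.List.pyRange min_val (min_val + remaining) 1).foldl
      (fun d val => d.modify val 0 (· + 1)) target_distribution).items

-- ===== PORT B =====
-- the 'while values_left > 0' loop, recursing on values_left (it decrements by 1 each turn)
def pvAltLoop : Nat → Int → Int → PySem.Dict Int Int → PySem.Dict Int Int
  | 0, _, _, d => d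
  | Nat.succ n, val, remaining, d =>
      let values_left : Int := (n : Int) + 1
      let share : Int := -(PySem.Int.floordiv (-remaining) values_left)  -- -(-remaining // values_left)
      pvAltLoop n (val + 1) (remaining - share) (d.insert val share)

def create_uniform_distribution_alt (min_val : Int) (max_val : Int) (total_samples : Int) : List (Int × Int) :=
  (pvAltLoop (max_val - min_val + 1).toNat min_val total_samples PySem.Dict.empty).items

-- ===== PRECONDITION & SPEC =====
-- Pre_ excludes only max_val = min_val - 1, where the Python A raises ZeroDivisionError.
def Pre_create_uniform_distribution (min_val : Int) (max_val : Int) (total_samples : Int) : Prop :=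
  max_val - min_val + 1 ≠ 0
instance (min_val : Int) (max_val : Int) (total_samples : Int) : Decidable (Pre_create_uniform_distribution min_val max_val total_samples) := by unfold Pre_create_uniform_distribution; infer_instance

def pvWitness_create_uniform_distribution : Int × Int × Int := (0, 50, 5000)

def Spec_create_uniform_distribution (min_val : Int) (max_val : Int) (total_samples : Int) (out : List (Int × Int)) : Prop := out = create_uniform_distribution_alt min_val max_val total_samples
instance (min_val : Int) (max_val : Int) (total_samples : Int) (out : List (Int × Int)) : Decidable (Spec_create_uniform_distribution min_val max_val total_samples out) := by unfold Spec_create_uniform_distribution; infer_instance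

-- ===== CLAIM (what is proved, stated in full; the proofs are below) =====
def Claim_equal_create_uniform_distribution : Prop := ∀ (min_val : Int) (max_val : Int) (total_samples : Int), Dom_create_uniform_distribution min_val max_val total_samples → Pre_create_uniform_distribution min_val max_val total_samples → Spec_create_uniform_distribution min_val max_val total_samples (create_uniform_distribution min_val max_val total_samples)


-- ===== LEMMAS AND PROOFS =====

-- Updating a set with elements it already contains leaves it unchanged.
lemma set_update_of_subset (s : PySem.Set Int) (xs : List Int) (h : ∀ x ∈ xs, x ∈ s) :
    PySem.Set.update s xs = s := by
  induction xs generalizing s with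
  | nil => exact PySem.Set.update_nil s
  | cons x xs ih =>
      rw [PySem.Set.update_cons, PySem.Set.add_of_mem (h x (by simp))]
      exact ih s (fun y hy => h y (by simp [hy]))

-- A's two passes compute, key by key, 'quotient + 1 below the threshold'.
lemma A_eq_map (min_val max_val total_samples : Int)
    (hpre : max_val - min_val + 1 ≠ 0) :
    create_uniform_distribution min_val max_val total_samples =
    (PySem.List.pyRange min_val (max_val + 1) 1).map
      (fun v => (v, PySem.Int.floordiv total_samples (max_val - min_val + 1) +
        if v < min_val + PySem.Int.mod total_samples (max_val - min_val + 1) then 1 else 0)) := by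
  unfold create_uniform_distribution
  dsimp only
  set num : Int := max_val - min_val + 1 with hnum
  set spv : Int := PySem.Int.floordiv total_samples num with hspv
  set r : Int := PySem.Int.mod total_samples num with hr
  have hrem : total_samples - spv * num = r := by
    have := PySem.Int.floordiv_mul_add_mod total_samples num
    rw [← hspv, ← hr] at this; linarith
  rw [hrem]
  set L : List Int := PySem.List.pyRange min_val (max_val + 1) 1 with hL
  set M : List Int := PySem.List.pyRange min_val (min_val + r) 1 with hM
  -- r < num, hence every member of M is a member of L
  have hML : ∀ x ∈ M, x ∈ L := by
    intro x hx
    rw [hM, PySem.List.mem_pyRange_one] at hx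
    rw [hL, PySem.List.mem_pyRange_one]
    rcases lt_or_gt_of_ne hpre with hneg | hpos
    · have := PySem.Int.mod_neg_bounds total_samples hneg
      rw [← hr] at this; omega
    · have := PySem.Int.mod_lt total_samples hpos
      rw [← hr] at this; omega
  set D0 : PySem.Dict Int Int :=
    L.foldl (fun d val => d.insert val spv) PySem.Dict.empty with hD0
  have hD0items : D0.items = L.map (fun v => (v, spv)) := by
    have h := PySem.Dict.items_foldl_insert_fresh L (fun a => a) (fun _ => spv)
      (PySem.Dict.empty (κ := Int) (ν := Int))
      (fun a _ => PySem.Dict.contains_empty a)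
      (by simpa using PySem.List.nodup_pyRange_one min_val (max_val + 1))
    simpa using h
  have hD0keys : D0.keys = L := by
    simp [PySem.Dict.keys, hD0items, Function.comp_def]
  have hD0nodup : D0.keys.Nodup := by
    rw [hD0keys, hL]; exact PySem.List.nodup_pyRange_one _ _
  set F : PySem.Dict Int Int := M.foldl (fun d val => d.modify val 0 (· + 1)) D0 with hF
  have hFkeys : F.keys = L := by
    have h := PySem.Dict.keys_foldl_modify M (0 : Int) (fun _ _ => (· + 1)) D0
    rw [hF, h, hD0keys]
    exact set_update_of_subset L M hML
  have hFnodup : F.keys.Nodup := by rw [hFkeys, hL]; exact PySem.List.nodup_pyRange_one _ _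
  have hitems : F.items = L.map (fun k => (k, F.getD k 0)) := by
    rw [PySem.Dict.items_eq_map_keys F hFnodup 0, hFkeys]
  rw [hitems]
  apply List.map_congr_left
  intro k hk
  have hgetD : F.getD k 0 = spv + (M.count k : Int) := by
    rw [hF, PySem.Dict.getD_foldl_modify_add_one]
    have hmem : (k, spv) ∈ D0.items := by rw [hD0items]; exact List.mem_map_of_mem hk
    rw [PySem.Dict.getD_of_mem_items D0 hmem hD0nodup 0]
  have hkL : min_val ≤ k ∧ k < max_val + 1 := by
    rw [hL, PySem.List.mem_pyRange_one] at hk; exact hk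
  have hcount : (M.count k : Int) = if k < min_val + r then 1 else 0 := by
    by_cases hkM : k ∈ M
    · have h1 : 1 ≤ M.count k := List.one_le_count_iff.mpr hkM
      have h2 : M.count k ≤ 1 :=
        List.nodup_iff_count_le_one.mp (hM ▸ PySem.List.nodup_pyRange_one _ _) k
      have : M.count k = 1 := by omega
      rw [this]
      rw [hM, PySem.List.mem_pyRange_one] at hkM
      simp [hkM.2]
    · have : M.count k = 0 := List.count_eq_zero.mpr hkM
      rw [this]
      rw [hM, PySem.List.mem_pyRange_one] at hkM
      have : ¬ k < min_val + r := by omega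
      simp [this]
  rw [hgetD, hcount]

-- B's greedy loop, run on spv*n + r remaining samples over n values, produces
-- exactly 'spv + 1 below the threshold val + r'.
lemma altLoop_items (n : Nat) (val spv r : Int)
    (hr0 : 0 ≤ r) (hrn : r < n ∨ r = 0)
    (d : PySem.Dict Int Int) (hfresh : ∀ k ∈ d.keys, k < val) :
    (pvAltLoop n val (spv * n + r) d).items =
      d.items ++ (PySem.List.pyRange val (val + n) 1).map
        (fun v => (v, spv + if v < val + r then 1 else 0)) := by
  induction n generalizing val spv r d with
  | zero =>
      have hr : r = 0 := by omega
      subst hr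
      simp [pvAltLoop, PySem.List.pyRange]
  | succ n ih =>
      rw [pvAltLoop]
      have hpos : (0 : Int) < (n : Int) + 1 := by positivity
      set ind : Int := if 0 < r then 1 else 0 with hind
      have hru : r < (n : Int) + 1 := by omega
      have hshare : -(PySem.Int.floordiv (-(spv * (↑n + 1) + r)) (↑n + 1)) = spv + ind := by
        rw [PySem.Int.neg_floordiv_neg_eq_iff_of_pos hpos]
        rw [hind]; split_ifs with h <;> constructor <;> nlinarith
      have hcast : ((Nat.succ n : Nat) : Int) = (n : Int) + 1 := by push_cast; ring
      rw [hcast, hshare]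
      have hrem' : spv * (↑n + 1) + r - (spv + ind) = spv * ↑n + (r - ind) := by ring
      rw [hrem']
      have hfresh' : ∀ k ∈ (d.insert val (spv + ind)).keys, k < val + 1 := by
        intro k hk
        rcases (PySem.Dict.mem_keys_insert _ _ _ _).mp hk with h | h
        · omega
        · have := hfresh k h; omega
      have hrn' : r - ind < (n : Int) ∨ r - ind = 0 := by
        rw [hind]; split_ifs <;> omega
      have hr0' : 0 ≤ r - ind := by rw [hind]; split_ifs <;> omega
      rw [ih (val + 1) spv (r - ind) hr0' hrn' _ hfresh']
      have hnotc : d.contains val = false := by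
        rw [← Bool.not_eq_true, PySem.Dict.contains_iff_mem_keys]
        intro h; exact absurd (hfresh val h) (lt_irrefl val)
      rw [PySem.Dict.items_insert_of_not_contains _ _ hnotc]
      have hlt : val < val + ((n : Int) + 1) := by omega
      rw [PySem.List.pyRange_one_cons hlt]
      simp only [List.map_cons, List.append_assoc, List.cons_append, List.nil_append]
      congr 1
      congr 1
      · have hhead : (val < val + r) = (0 < r) := by simp
        rw [hind]; simp only [hhead]
      · rw [show val + 1 + (n : Int) = val + ((n : Int) + 1) from by ring]
        apply List.map_congr_left
        intro v hv
        rw [PySem.List.mem_pyRange_one] at hv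
        congr 2
        rw [hind]
        split_ifs with h1 h2 h2 <;> try rfl
        all_goals (exfalso; omega)

lemma main_eq (min_val max_val total_samples : Int)
    (hpre : max_val - min_val + 1 ≠ 0) :
    create_uniform_distribution min_val max_val total_samples =
    create_uniform_distribution_alt min_val max_val total_samples := by
  rw [A_eq_map min_val max_val total_samples hpre]
  unfold create_uniform_distribution_alt
  set num : Int := max_val - min_val + 1 with hnum
  rcases lt_or_gt_of_ne hpre with hneg | hpos
  · -- num < 0: both sides are empty
    have h1 : num.toNat = 0 := by omega
    have h2 : PySem.List.pyRange min_val (max_val + 1) 1 = [] := by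
      have : ∀ x, x ∉ PySem.List.pyRange min_val (max_val + 1) 1 := by
        intro x hx; rw [PySem.List.mem_pyRange_one] at hx; omega
      exact List.eq_nil_iff_forall_not_mem.mpr this
    rw [h1, h2]
    simp [pvAltLoop, PySem.Dict.empty]
  · set spv : Int := PySem.Int.floordiv total_samples num with hspv
    set r : Int := PySem.Int.mod total_samples num with hr
    have htot : total_samples = spv * num + r := by
      have := PySem.Int.floordiv_mul_add_mod total_samples num
      rw [← hspv, ← hr] at this; linarith
    have hcast : ((num.toNat : Nat) : Int) = num := by omega
    have hr0 : 0 ≤ r := hr ▸ PySem.Int.mod_nonneg total_samples hpos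
    have hrn : r < (num.toNat : Int) ∨ r = 0 := by
      left; rw [hcast]; exact hr ▸ PySem.Int.mod_lt total_samples hpos
    have := altLoop_items num.toNat min_val spv r hr0 hrn PySem.Dict.empty
      (by intro k hk; rw [PySem.Dict.keys_empty] at hk; exact absurd hk (List.not_mem_nil))
    rw [show spv * (num.toNat : Int) + r = total_samples from by rw [hcast]; omega] at this
    rw [this, show (PySem.Dict.empty : PySem.Dict Int Int).items = [] from rfl, List.nil_append, hcast,
      show min_val + num = max_val + 1 from by omega]

-- ===== VERDICT (by name: the statement is the Claim_ definition above) =====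
theorem create_uniform_distribution_spec : Claim_equal_create_uniform_distribution := by
  intro min_val max_val total_samples _ hpre
  unfold Spec_create_uniform_distribution
  exact main_eq min_val max_val total_samples hpre
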